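-- pv_equiv track=rewrite | github.com/hwmaltby/project-euler | problem_75.py | gcd_table
-- ===== SOURCE A (Python) =====
-- def gcd_table(m, n):
--     gcds = [[0] * n for i in range(m)]
--     for i in range(1, m):
--         for j in range(1, n):
--             if i == j:
--                 gcds[i][j] = i
--             elif j == 1 or i == 1:
--                 gcds[i][j] = 1
--             elif j > i:
--                 gcds[i][j] = gcds[i][j - i]
--             else:
--                 gcds[i][j] = gcds[i - j][j]
--     return gcds
-- ===== SOURCE B (Python) =====
-- import math
--
-- def gcd_table(m, n):
--     # Each cell is computed directly with Euclid's division-based gcd;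
--     # row 0 and column 0 stay 0, matching the table A never fills there.
--     return [[math.gcd(i, j) if i and j else 0 for j in range(n)]
--             for i in range(m)]
-- ===== Notes on version B (the rewrite author's own statement) =====
-- stated objective: simpler
-- what changed: Replaces the mutable table filled by a subtractive-Euclid dynamic-programming recurrence (four branches reading previously filled cells) with a nested comprehension computing every cell independently as math.gcd(i, j) (0 on row/column 0).
import Mathlib
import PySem

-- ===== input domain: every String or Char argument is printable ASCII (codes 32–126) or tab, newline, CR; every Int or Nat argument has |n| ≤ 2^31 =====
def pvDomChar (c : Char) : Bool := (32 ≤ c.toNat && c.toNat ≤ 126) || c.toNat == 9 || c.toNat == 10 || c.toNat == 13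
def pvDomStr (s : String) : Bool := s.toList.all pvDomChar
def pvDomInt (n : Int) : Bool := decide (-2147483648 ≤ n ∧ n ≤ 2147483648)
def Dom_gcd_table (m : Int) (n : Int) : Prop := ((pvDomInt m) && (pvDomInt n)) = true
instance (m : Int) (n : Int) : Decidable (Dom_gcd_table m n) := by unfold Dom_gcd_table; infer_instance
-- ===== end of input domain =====

-- B replaces A's mutable table filled by a subtractive-Euclid recurrence with a nested
-- comprehension computing each cell independently as math.gcd(i, j) (0 on row/column 0); simpler.

-- ===== PORT A =====
-- inner loop body: one iteration of 'for j in range(1, n)' (indices i, j are loop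
-- variables of range(1, _), hence nonnegative and in range: pyGetD/pySetD are exact here)
def gcdTableInner (i : Int) (t : List (List Int)) (j : Int) : List (List Int) :=
  let v : Int :=
    if i = j then i
    else if j = 1 ∨ i = 1 then 1
    else if i < j then PySem.List.pyGetD (PySem.List.pyGetD t i []) (j - i) 0
    else PySem.List.pyGetD (PySem.List.pyGetD t (i - j) []) j 0
  PySem.List.pySetD t i (PySem.List.pySetD (PySem.List.pyGetD t i []) j v)

-- outer loop body: 'for i in range(1, m)'
def gcdTableOuter (n : Int) (t : List (List Int)) (i : Int) : List (List Int) :=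
  (PySem.List.pyRange 1 n 1).foldl (gcdTableInner i) t

-- '[0] * n' is List.replicate n.toNat 0: Python's list repetition gives [] for n ≤ 0, as toNat does
def gcd_table (m : Int) (n : Int) : List (List Int) :=
  (PySem.List.pyRange 1 m 1).foldl (gcdTableOuter n)
    ((PySem.List.pyRange 0 m 1).map (fun _ => List.replicate n.toNat 0))

-- ===== PORT B =====
-- math.gcd on the nonnegative loop indices is Int.gcd; 'i and j' on range values means i ≠ 0 ∧ j ≠ 0
def gcd_table_alt (m : Int) (n : Int) : List (List Int) :=
  (PySem.List.pyRange 0 m 1).map (fun i =>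
    (PySem.List.pyRange 0 n 1).map (fun j =>
      if i ≠ 0 ∧ j ≠ 0 then (Int.gcd i j : Int) else 0))

-- ===== PRECONDITION & SPEC =====
def Spec_gcd_table (m : Int) (n : Int) (out : List (List Int)) : Prop := out = gcd_table_alt m n
instance (m : Int) (n : Int) (out : List (List Int)) : Decidable (Spec_gcd_table m n out) := by unfold Spec_gcd_table; infer_instance

-- ===== CLAIM (what is proved, stated in full; the proofs are below) =====
def Claim_equal_gcd_table : Prop := ∀ (m : Int) (n : Int), Dom_gcd_table m n → Spec_gcd_table m n (gcd_table m n)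

-- ===== LEMMAS AND PROOFS =====

-- the intended value of cell (i, j)
def pvF (i j : Nat) : Int := if i = 0 ∨ j = 0 then 0 else (Nat.gcd i j : Int)

-- row i of the finished table
def pvRow (N i : Nat) : List Int := (List.range N).map (fun j => pvF i j)

-- row i with columns < c filled, the rest still 0
def pvPartRow (N i c : Nat) : List Int :=
  (List.range N).map (fun j => if j < c then pvF i j else 0)

-- table with rows < k finished, the rest still all-zero
def pvTab (M N k : Nat) : List (List Int) :=
  (List.range M).map (fun r => if r < k then pvRow N r else List.replicate N 0)

-- table mid-way through row i: rows < i finished, row i filled through columns < c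
def pvMid (M N i c : Nat) : List (List Int) :=
  (List.range M).map (fun r =>
    if r < i then pvRow N r else if r = i then pvPartRow N i c else List.replicate N 0)

lemma pvRow_zero (N : Nat) : pvRow N 0 = List.replicate N 0 := by
  apply List.ext_getElem <;> simp [pvRow, pvF]

lemma pvPartRow_one (N i : Nat) : pvPartRow N i 1 = List.replicate N 0 := by
  apply List.ext_getElem
  · simp [pvPartRow]
  · intro j h1 h2
    simp only [pvPartRow, List.getElem_map, List.getElem_range, List.getElem_replicate]
    by_cases hj : j < 1
    · rw [if_pos hj]
      have : j = 0 := by omega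
      subst this
      simp [pvF]
    · rw [if_neg hj]

lemma pvPartRow_full (N i c : Nat) (h : N ≤ c) : pvPartRow N i c = pvRow N i := by
  unfold pvPartRow pvRow
  apply List.map_congr_left
  intro j hj
  simp only [List.mem_range] at hj
  rw [if_pos (by omega)]

lemma pvMid_one (M N i : Nat) : pvMid M N i 1 = pvTab M N i := by
  unfold pvMid pvTab
  apply List.map_congr_left
  intro r _
  rcases lt_trichotomy r i with h | h | h
  · rw [if_pos h, if_pos h]
  · subst h
    rw [if_neg (lt_irrefl r), if_pos rfl, if_neg (lt_irrefl r), pvPartRow_one]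
  · rw [if_neg (by omega), if_neg (by omega), if_neg (by omega)]

lemma pvMid_full (M N i c : Nat) (h : N ≤ c) : pvMid M N i c = pvTab M N (i + 1) := by
  unfold pvMid pvTab
  apply List.map_congr_left
  intro r _
  rcases lt_trichotomy r i with hr | hr | hr
  · rw [if_pos hr, if_pos (by omega)]
  · subst hr
    rw [if_neg (lt_irrefl r), if_pos rfl, if_pos (by omega), pvPartRow_full N r c h]
  · rw [if_neg (by omega), if_neg (by omega), if_neg (by omega)]

lemma pvTab_stable (M N k : Nat) (h : M ≤ k) : pvTab M N k = pvTab M N M := by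
  unfold pvTab
  apply List.map_congr_left
  intro r hr
  simp only [List.mem_range] at hr
  rw [if_pos (by omega), if_pos hr]

lemma pvTab_zero_one (M N : Nat) : pvTab M N 0 = pvTab M N 1 := by
  unfold pvTab
  apply List.map_congr_left
  intro r _
  rcases Nat.eq_zero_or_pos r with h | h
  · subst h
    rw [if_neg (by omega), if_pos (by omega), pvRow_zero]
  · rw [if_neg (by omega), if_neg (by omega)]

-- one inner-loop iteration advances pvMid by one column
lemma pv_step (M N i j : Nat) (hi1 : 1 ≤ i) (hiM : i < M) (hj1 : 1 ≤ j) (hjN : j < N) :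
    gcdTableInner (i : Int) (pvMid M N i j) (j : Int) = pvMid M N i (j + 1) := by
  have hrow : PySem.List.pyGetD (pvMid M N i j) (i : Int) [] = pvPartRow N i j := by
    rw [PySem.List.pyGetD_natCast]
    unfold pvMid
    rw [PySem.List.getD_map_range _ M i _ hiM, if_neg (lt_irrefl i), if_pos rfl]
  have hv : (if (i : Int) = (j : Int) then (i : Int)
      else if (j : Int) = 1 ∨ (i : Int) = 1 then 1
      else if (i : Int) < (j : Int) then
        PySem.List.pyGetD (PySem.List.pyGetD (pvMid M N i j) (i : Int) []) ((j : Int) - (i : Int)) 0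
      else PySem.List.pyGetD (PySem.List.pyGetD (pvMid M N i j) ((i : Int) - (j : Int)) []) (j : Int) 0)
      = pvF i j := by
    by_cases hij : i = j
    · subst hij
      rw [if_pos rfl]
      unfold pvF
      rw [if_neg (by omega), Nat.gcd_self]
    · rw [if_neg (by exact_mod_cast hij)]
      by_cases h1 : j = 1 ∨ i = 1
      · rw [if_pos (by rcases h1 with h | h <;> subst h <;> [exact Or.inl Nat.cast_one; exact Or.inr Nat.cast_one])]
        unfold pvF
        rw [if_neg (by omega)]
        rcases h1 with h | h <;> subst h
        · rw [Nat.gcd_one_right, Nat.cast_one]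
        · rw [Nat.gcd_one_left, Nat.cast_one]
      · push_neg at h1
        rw [if_neg (by push_neg; exact ⟨by exact_mod_cast h1.1, by exact_mod_cast h1.2⟩)]
        by_cases hlt : i < j
        · rw [if_pos (by exact_mod_cast hlt), hrow]
          have hcast : (j : Int) - (i : Int) = ((j - i : Nat) : Int) := by omega
          rw [hcast, PySem.List.pyGetD_natCast]
          unfold pvPartRow
          rw [PySem.List.getD_map_range _ N (j - i) _ (by omega), if_pos (by omega)]
          unfold pvF
          rw [if_neg (by omega), if_neg (by omega),
              Nat.gcd_sub_self_right (by omega : i ≤ j)]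
        · rw [if_neg (by exact_mod_cast hlt)]
          have hji : j < i := by omega
          have hcast : (i : Int) - (j : Int) = ((i - j : Nat) : Int) := by omega
          rw [hcast, PySem.List.pyGetD_natCast, PySem.List.pyGetD_natCast]
          unfold pvMid
          rw [PySem.List.getD_map_range _ M (i - j) _ (by omega), if_pos (by omega)]
          unfold pvRow
          rw [PySem.List.getD_map_range _ N j _ hjN]
          unfold pvF
          rw [if_neg (by omega), if_neg (by omega),
              Nat.gcd_sub_self_left (by omega : j ≤ i)]
  unfold gcdTableInner
  rw [hv, hrow, PySem.List.pySetD_natCast, PySem.List.pySetD_natCast]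
  have hsetrow : (pvPartRow N i j).set j (pvF i j) = pvPartRow N i (j + 1) := by
    apply List.ext_getElem
    · simp [pvPartRow]
    · intro k hk hk'
      have hkN : k < N := by simpa [pvPartRow] using hk'
      rw [List.getElem_set]
      simp only [pvPartRow, List.getElem_map, List.getElem_range]
      by_cases hkj : j = k
      · subst hkj
        rw [if_pos rfl, if_pos (by omega)]
      · rw [if_neg hkj]
        by_cases hlt : k < j
        · rw [if_pos hlt, if_pos (by omega)]
        · rw [if_neg hlt, if_neg (by omega)]
  rw [hsetrow]
  apply List.ext_getElem
  · simp [pvMid]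
  · intro r hr hr'
    have hrM : r < M := by simpa [pvMid] using hr'
    rw [List.getElem_set]
    simp only [pvMid, List.getElem_map, List.getElem_range]
    by_cases hri : i = r
    · subst hri
      rw [if_pos rfl, if_neg (lt_irrefl i), if_pos rfl]
    · rw [if_neg hri]
      rcases lt_trichotomy r i with h | h | h
      · rw [if_pos h, if_pos h]
      · exact absurd h.symm hri
      · rw [if_neg (by omega), if_neg (by omega), if_neg (by omega), if_neg (by omega)]

-- the inner foldl finishes row i
lemma pv_inner (n : Int) (M N i : Nat) (hN : N = n.toNat) (hi1 : 1 ≤ i) (hiM : i < M) :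
    ∀ c : Nat, 1 ≤ c →
      (PySem.List.pyRange (c : Int) n 1).foldl (gcdTableInner (i : Int)) (pvMid M N i c)
        = pvMid M N i N := by
  intro c hc
  by_cases hcn : n ≤ (c : Int)
  case pos =>
    have hemp : PySem.List.pyRange (c : Int) n 1 = [] := by
      simp [PySem.List.pyRange, hcn]
    rw [hemp]
    simp only [List.foldl_nil]
    unfold pvMid
    apply List.map_congr_left
    intro r _
    have hpr : pvPartRow N i c = pvPartRow N i N := by
      unfold pvPartRow
      apply List.map_congr_left
      intro j hj
      simp only [List.mem_range] at hj
      rw [if_pos (by omega), if_pos (by omega)]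
    rw [hpr]
  case neg =>
    push_neg at hcn
    have hcN : c < N := by omega
    rw [PySem.List.pyRange_one_cons hcn]
    simp only [List.foldl_cons]
    rw [pv_step M N i c hi1 hiM hc hcN]
    have hcast : ((c : Int) + 1) = ((c + 1 : Nat) : Int) := by push_cast; ring
    rw [hcast]
    exact pv_inner n M N i hN hi1 hiM (c + 1) (by omega)
termination_by c => N - c
decreasing_by omega

-- the outer foldl finishes the table
lemma pv_outer (m n : Int) (M N : Nat) (hM : M = m.toNat) (hN : N = n.toNat) :
    ∀ k : Nat, 1 ≤ k →
      (PySem.List.pyRange (k : Int) m 1).foldl (gcdTableOuter n) (pvTab M N k)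
        = pvTab M N M := by
  intro k hk
  by_cases hkm : m ≤ (k : Int)
  case pos =>
    have hemp : PySem.List.pyRange (k : Int) m 1 = [] := by
      simp [PySem.List.pyRange, hkm]
    rw [hemp]
    simp only [List.foldl_nil]
    exact pvTab_stable M N k (by omega)
  case neg =>
    push_neg at hkm
    have hkM : k < M := by omega
    rw [PySem.List.pyRange_one_cons hkm]
    simp only [List.foldl_cons]
    have hstep : gcdTableOuter n (pvTab M N k) (k : Int) = pvTab M N (k + 1) := by
      unfold gcdTableOuter
      rw [← pvMid_one M N k]
      have h1 : (PySem.List.pyRange (((1 : Nat) : Int)) n 1).foldl (gcdTableInner (k : Int))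
          (pvMid M N k 1) = pvMid M N k N :=
        pv_inner n M N k hN hk hkM 1 le_rfl
      simp only [Nat.cast_one] at h1
      rw [h1]
      exact pvMid_full M N k N le_rfl
    rw [hstep]
    have hcast : ((k : Int) + 1) = ((k + 1 : Nat) : Int) := by push_cast; ring
    rw [hcast]
    exact pv_outer m n M N hM hN (k + 1) (by omega)
termination_by k => M - k
decreasing_by omega

lemma pv_init (m n : Int) :
    (PySem.List.pyRange 0 m 1).map (fun _ => List.replicate n.toNat 0)
      = pvTab m.toNat n.toNat 0 := by
  by_cases hm : m ≤ 0
  · have hemp : PySem.List.pyRange 0 m 1 = [] := by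
      simp [PySem.List.pyRange, hm]
    rw [hemp]
    simp [pvTab, (by omega : m.toNat = 0)]
  · have hm' : m = ((m.toNat : Nat) : Int) := by omega
    rw [hm', PySem.List.pyRange_zero_natCast]
    unfold pvTab
    rw [List.map_map]
    apply List.map_congr_left
    intro r _
    simp

lemma pv_alt (m n : Int) : gcd_table_alt m n = pvTab m.toNat n.toNat m.toNat := by
  unfold gcd_table_alt
  by_cases hm : m ≤ 0
  · have hemp : PySem.List.pyRange 0 m 1 = [] := by
      simp [PySem.List.pyRange, hm]
    rw [hemp]
    simp [pvTab, (by omega : m.toNat = 0)]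
  · have hm' : m = ((m.toNat : Nat) : Int) := by omega
    conv_lhs => rw [hm', PySem.List.pyRange_zero_natCast]
    unfold pvTab
    rw [List.map_map]
    apply List.map_congr_left
    intro r hr
    simp only [Function.comp_apply, List.mem_range] at hr ⊢
    rw [if_pos hr]
    unfold pvRow
    by_cases hn : n ≤ 0
    · have hemp : PySem.List.pyRange 0 n 1 = [] := by
        simp [PySem.List.pyRange, hn]
      rw [hemp]
      simp [(by omega : n.toNat = 0)]
    · have hn' : n = ((n.toNat : Nat) : Int) := by omega
      conv_lhs => rw [hn', PySem.List.pyRange_zero_natCast]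
      rw [List.map_map]
      apply List.map_congr_left
      intro j _
      simp only [Function.comp_apply]
      unfold pvF
      by_cases h : r = 0 ∨ j = 0
      · rcases h with h | h <;> subst h <;> simp
      · push_neg at h
        rw [if_pos ⟨by exact_mod_cast h.1, by exact_mod_cast h.2⟩,
            if_neg (by omega), Int.gcd_natCast_natCast]

-- ===== VERDICT (by name: the statement is the Claim_ definition above) =====
theorem gcd_table_spec : Claim_equal_gcd_table := by
  intro m n _
  unfold Spec_gcd_table gcd_table
  rw [pv_init m n, pvTab_zero_one, pv_alt]
  have h1 : ((1 : Int)) = (((1 : Nat)) : Int) := by norm_num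
  rw [h1]
  exact pv_outer m n m.toNat n.toNat rfl rfl 1 le_rfl
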